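-- pv_equiv track=rewrite | github.com/ThomasKarpinski/Matura | matura2008_PR_Python_probna/zamek_szyfrowy_zad1.py | zamek
-- ===== SOURCE A (Python) =====
-- def dwojkowy(n):
--     wynik = ''
--     while n > 0:
--         if n % 2 == 0:
--             wynik += '0'
--             n //= 2
--         else:
--             wynik += '1'
--             n //= 2
--     return wynik[::-1]
--
-- def zamek(n):
--     b = dwojkowy(n)
--     suma = 0
--     for i in b:
--         if i == '1':
--             suma += 1
--     if 2 <= len(b) <= 10 and b[1] == '0' and suma % 2 == 0:
--         return True
--     else:
--         return False
-- ===== SOURCE B (Python) =====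
-- def zamek(n):
--     if n <= 0:
--         return False
--     L = n.bit_length()
--     if L < 2 or L > 10:
--         return False
--     return (n >> (L - 2)) & 1 == 0 and n.bit_count() % 2 == 0
-- ===== Notes on version B (the rewrite author's own statement) =====
-- stated objective: idiomatic
-- what changed: B drops the binary-string construction and its two scans entirely and decides the condition with closed-form bit arithmetic: n.bit_length() for the length test, (n >> (L-2)) & 1 for the second-most-significant bit, n.bit_count() for the parity of ones.
import Mathlib
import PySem

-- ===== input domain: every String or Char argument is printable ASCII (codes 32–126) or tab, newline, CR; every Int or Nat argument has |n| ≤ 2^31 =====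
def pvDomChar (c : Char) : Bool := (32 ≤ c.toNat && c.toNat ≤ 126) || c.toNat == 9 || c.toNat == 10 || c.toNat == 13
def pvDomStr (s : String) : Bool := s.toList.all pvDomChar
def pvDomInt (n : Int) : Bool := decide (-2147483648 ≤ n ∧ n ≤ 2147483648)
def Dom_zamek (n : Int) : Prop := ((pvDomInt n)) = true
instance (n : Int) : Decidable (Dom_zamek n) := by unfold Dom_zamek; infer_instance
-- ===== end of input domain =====

-- B replaces A's binary-string construction and two scans by closed-form bit arithmetic
-- (bit_length / bit_count / shift); objective: idiomatic.

-- ===== PORT A =====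
-- the while-loop of dwojkowy, state = (n, wynik)
def dwojkowyLoop (n : Int) (wynik : List Char) : List Char :=
  if h : 0 < n then
    if PySem.Int.mod n 2 == 0 then
      dwojkowyLoop (PySem.Int.floordiv n 2) (wynik ++ ['0'])
    else
      dwojkowyLoop (PySem.Int.floordiv n 2) (wynik ++ ['1'])
  else wynik
termination_by n.toNat
decreasing_by
  all_goals
    rw [PySem.Int.floordiv_eq_ediv_of_pos (by norm_num)]
    omega

-- wynik[::-1] is reverse (PySem.List.slice?_none_none_neg_one)
def dwojkowy (n : Int) : List Char := (dwojkowyLoop n []).reverse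

def zamek (n : Int) : Bool :=
  let b := dwojkowy n
  let suma := b.foldl (fun s c => if c == '1' then s + 1 else s) (0 : Int)
  if (decide (2 ≤ b.length) && decide (b.length ≤ 10)) &&
      (PySem.List.pyGet? b 1 == some '0') && (suma % 2 == 0) then true else false

-- ===== PORT B =====
def zamek_alt (n : Int) : Bool :=
  if n ≤ 0 then false
  else
    let L := PySem.Int.bitLength n          -- n.bit_length()
    if L < 2 || 10 < L then false
    else (PySem.Int.band (n >>> (L - 2)) 1 == 0) &&
         (PySem.Int.bitCount n % 2 == 0)    -- n.bit_count()

-- ===== PRECONDITION & SPEC =====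
def Spec_zamek (n : Int) (out : Bool) : Prop := out = zamek_alt n
instance (n : Int) (out : Bool) : Decidable (Spec_zamek n out) := by unfold Spec_zamek; infer_instance

-- ===== CLAIM (what is proved, stated in full; the proofs are below) =====
def Claim_equal_zamek : Prop := ∀ (n : Int), Dom_zamek n → Spec_zamek n (zamek n)

-- ===== LEMMAS AND PROOFS =====

-- LSB-first binary digits, the value dwojkowyLoop accumulates
def lsb (m : Nat) : List Char :=
  if h : m = 0 then [] else (if m % 2 = 0 then '0' else '1') :: lsb (m / 2)
decreasing_by exact Nat.div_lt_self (Nat.pos_of_ne_zero h) (by norm_num)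

theorem dwojkowyLoop_eq (m : Nat) : ∀ (n : Int) (w : List Char), n.toNat = m →
    dwojkowyLoop n w = w ++ lsb m := by
  induction m using Nat.strong_induction_on with
  | _ m ih =>
    intro n w hm
    rw [dwojkowyLoop]
    by_cases h : 0 < n
    · have hn : n = (m : Int) := by omega
      have hmpos : m ≠ 0 := by omega
      have hmod : PySem.Int.mod n 2 = ((m % 2 : Nat) : Int) := by
        rw [hn]; exact_mod_cast PySem.Int.mod_natCast m 2
      have hdiv : PySem.Int.floordiv n 2 = ((m / 2 : Nat) : Int) := by
        rw [hn]; exact_mod_cast PySem.Int.floordiv_natCast m 2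
      have hrec := ih (m / 2) (Nat.div_lt_self (by omega) (by norm_num))
      rw [dif_pos h, hmod, hdiv, lsb]
      rw [dif_neg hmpos]
      by_cases hpar : m % 2 = 0
      · rw [if_pos (by simp [hpar]), hrec _ _ (by omega), hpar]
        simp
      · have h1 : m % 2 = 1 := by omega
        rw [if_neg (by simp [h1]), hrec _ _ (by omega), h1]
        simp
    · have hz : m = 0 := by omega
      rw [dif_neg h, hz, lsb]
      simp

theorem length_lsb (m : Nat) : (lsb m).length = PySem.Int.bitLength (m : Int) := by
  induction m using Nat.strong_induction_on with
  | _ m ih =>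
    by_cases h : m = 0
    · simp [h, lsb, PySem.Int.bitLength_zero]
    · rw [lsb, PySem.Int.bitLength_natCast (show 0 < m by omega)]
      simp [h, ih (m / 2) (Nat.div_lt_self (by omega) (by norm_num))]

theorem count_lsb (m : Nat) : (lsb m).count '1' = PySem.Int.bitCount (m : Int) := by
  induction m using Nat.strong_induction_on with
  | _ m ih =>
    by_cases h : m = 0
    · simp [h, lsb, PySem.Int.bitCount_zero]
    · rw [lsb, PySem.Int.bitCount_natCast (show 0 < m by omega)]
      have hrec := ih (m / 2) (Nat.div_lt_self (by omega) (by norm_num))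
      by_cases hpar : m % 2 = 0
      · simp [h, hpar, List.count_cons, hrec]
      · have h1 : m % 2 = 1 := by omega
        simp [h, h1, List.count_cons, hrec, Nat.add_comm]

theorem getElem?_lsb (m : Nat) : ∀ i, i < (lsb m).length →
    (lsb m)[i]? = some (if m / 2 ^ i % 2 = 0 then '0' else '1') := by
  induction m using Nat.strong_induction_on with
  | _ m ih =>
    intro i hi
    by_cases h : m = 0
    · simp [h, lsb] at hi
    · rw [lsb]; simp only [h, reduceDIte]
      cases i with
      | zero => simp
      | succ i =>
        rw [lsb] at hi; simp only [h, reduceDIte, List.length_cons] at hi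
        have hrec := ih (m / 2) (Nat.div_lt_self (by omega) (by norm_num)) i (by omega)
        have hp : m / 2 / 2 ^ i = m / 2 ^ (i + 1) := by
          rw [Nat.div_div_eq_div_mul]
          congr 1
          ring
        simp only [List.getElem?_cons_succ, hrec, hp]

theorem foldl_count (l : List Char) : ∀ (s : Int),
    l.foldl (fun s c => if c == '1' then s + 1 else s) s = s + (l.count '1' : Int) := by
  induction l with
  | nil => simp
  | cons c t ih =>
    intro s
    rw [List.foldl_cons, ih]
    by_cases h : c = '1' <;> simp [h, List.count_cons] <;> push_cast <;> ring

theorem zamek_eq_alt (n : Int) : zamek n = zamek_alt n := by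
  by_cases hn : 0 < n
  · have hcast : n = (n.toNat : Int) := by omega
    have hb : dwojkowy n = (lsb n.toNat).reverse := by
      rw [dwojkowy, dwojkowyLoop_eq n.toNat n [] rfl]
      simp
    have hlen : (lsb n.toNat).length = PySem.Int.bitLength n := by
      rw [length_lsb, ← hcast]
    have hcnt : (lsb n.toNat).reverse.count '1' = PySem.Int.bitCount n := by
      rw [List.count_reverse, count_lsb, ← hcast]
    rw [zamek, zamek_alt, if_neg (by omega : ¬ n ≤ 0)]
    simp only [hb]
    rw [foldl_count]
    by_cases h2 : 2 ≤ PySem.Int.bitLength n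
    · by_cases h10 : PySem.Int.bitLength n ≤ 10
      · -- index 1 of the reversed string is the bit at position bitLength - 2
        have hget : PySem.List.pyGet? (lsb n.toNat).reverse 1 =
            some (if n.toNat / 2 ^ (PySem.Int.bitLength n - 2) % 2 = 0 then '0' else '1') := by
          rw [show (1 : Int) = ((1 : Nat) : Int) from rfl, PySem.List.pyGet?_natCast]
          rw [List.getElem?_reverse (by omega)]
          rw [show (lsb n.toNat).length - 1 - 1 = PySem.Int.bitLength n - 2 by omega]
          exact getElem?_lsb n.toNat _ (by omega)
        have hband : PySem.Int.band (n >>> (PySem.Int.bitLength n - 2)) 1 =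
            ((n.toNat >>> (PySem.Int.bitLength n - 2) &&& 1 : Nat) : Int) := by
          calc PySem.Int.band (n >>> (PySem.Int.bitLength n - 2)) 1
              = PySem.Int.band (((n.toNat >>> (PySem.Int.bitLength n - 2) : Nat) : Int)) 1 := by
                rw [Int.natCast_shiftRight, ← hcast]
            _ = ((n.toNat >>> (PySem.Int.bitLength n - 2) &&& 1 : Nat) : Int) := by
                exact_mod_cast PySem.Int.band_natCast (n.toNat >>> (PySem.Int.bitLength n - 2)) 1
        have hbitval : n.toNat >>> (PySem.Int.bitLength n - 2) &&& 1 =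
            n.toNat / 2 ^ (PySem.Int.bitLength n - 2) % 2 := by
          rw [Nat.and_one_is_mod, Nat.shiftRight_eq_div_pow]
        rw [if_neg (show ¬ (PySem.Int.bitLength n < 2 || 10 < PySem.Int.bitLength n) = true by
          simp only [Bool.or_eq_true, decide_eq_true_eq]; omega)]
        rw [hget, hband, hbitval]
        simp only [List.length_reverse, hlen, hcnt, zero_add]
        by_cases hbit : n.toNat / 2 ^ (PySem.Int.bitLength n - 2) % 2 = 0
        · by_cases hpar : PySem.Int.bitCount n % 2 = 0
          · have hip : (PySem.Int.bitCount n : Int) % 2 = 0 := by omega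
            simp [hbit, hpar, h2, h10, hip]
          · have hip : ¬ (PySem.Int.bitCount n : Int) % 2 = 0 := by omega
            simp [hbit, hpar, h2, h10, hip]
        · have h1 : n.toNat / 2 ^ (PySem.Int.bitLength n - 2) % 2 = 1 := by omega
          simp [h1]
      · rw [if_pos (show (PySem.Int.bitLength n < 2 || 10 < PySem.Int.bitLength n) = true by
          simp only [Bool.or_eq_true, decide_eq_true_eq]; omega)]
        simp only [List.length_reverse, hlen]
        simp [h10]
    · rw [if_pos (show (PySem.Int.bitLength n < 2 || 10 < PySem.Int.bitLength n) = true by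
        simp only [Bool.or_eq_true, decide_eq_true_eq]; omega)]
      simp only [List.length_reverse, hlen]
      simp [h2]
  · -- n ≤ 0 : the loop never runs, A tests an empty string; B returns False
    have hloop : dwojkowyLoop n [] = [] := by
      rw [dwojkowyLoop, dif_neg hn]
    rw [zamek, zamek_alt]
    simp [dwojkowy, hloop, show n ≤ 0 by omega]

-- ===== VERDICT (by name: the statement is the Claim_ definition above) =====
theorem zamek_spec : Claim_equal_zamek := by
  intro n _
  unfold Spec_zamek
  exact zamek_eq_alt n
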